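-- pv_equiv track=rewrite | github.com/ajaysurya8888/DCA2021 | removeNumbers.py | removeNum
-- ===== SOURCE A (Python) =====
-- def  removeNum(si):
--     s=list(si)
--     lent=len(s)
--     i=0
--     ans=""
--     while i<lent:
--         if s[i].isdigit():
--             if s[i]=="7":
--                 i=i+1
--             elif s[i]=="5" and i+1<lent:
--                 if s[i+1]=="7":
--                     i+=2
--                 else:
--                     ans=ans+s[i]
--                     i+=1
--             else:
--                 ans=ans+s[i]
--                 i+=1
--         else:
--             ans = ans + s[i]
--             i += 1
--     return ans
-- ===== SOURCE B (Python) =====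
-- def removeNum(si):
--     return si.replace("57", "").replace("7", "")
-- ===== Notes on version B (the rewrite author's own statement) =====
-- stated objective: simpler
-- what changed: Replaces A's stateful while-loop (digit tests, variable step i+=2, repeated string concatenation) by two staged substring-replacement passes: delete every "57" occurrence, then delete every remaining "7"; correct because every '7' is deleted anyway, so deleting a '5' exactly when "57" occurs at its position gives the same string.
import Mathlib
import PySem

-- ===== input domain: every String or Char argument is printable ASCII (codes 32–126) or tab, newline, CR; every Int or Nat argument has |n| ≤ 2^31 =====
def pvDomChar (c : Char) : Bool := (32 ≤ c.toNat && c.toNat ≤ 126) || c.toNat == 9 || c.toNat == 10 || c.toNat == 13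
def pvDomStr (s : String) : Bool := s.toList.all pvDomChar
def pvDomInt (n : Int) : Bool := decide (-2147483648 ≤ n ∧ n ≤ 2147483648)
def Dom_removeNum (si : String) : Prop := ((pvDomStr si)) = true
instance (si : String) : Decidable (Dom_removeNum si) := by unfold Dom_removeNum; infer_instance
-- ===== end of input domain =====

-- B replaces A's stateful while-loop (variable step i+=2, repeated concatenation) by two
-- staged substring replacements: delete every "57", then every remaining "7"; same return value.

-- ===== PORT A =====
-- A's while-loop over s = list(si) with index i, transliterated as recursion on the
-- remaining suffix; ans is the accumulated output (Python's ans=ans+s[i] = ans ++ [c]).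
def removeNumGo (s : List Char) (ans : List Char) : List Char :=
  match s with
  | [] => ans
  | c :: rest =>
    if PySem.Chars.isdigit c then
      if c == '7' then removeNumGo rest ans            -- i = i+1, drop '7'
      else if c == '5' then
        match rest with
        | d :: rest2 =>                                 -- i+1 < lent
          if d == '7' then removeNumGo rest2 ans        -- i += 2
          else removeNumGo (d :: rest2) (ans ++ [c])
        | [] => removeNumGo [] (ans ++ [c])             -- i+1 < lent is False: else branch
      else removeNumGo rest (ans ++ [c])
    else removeNumGo rest (ans ++ [c])
termination_by s.length
decreasing_by all_goals simp only [List.length_cons]; omega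

def removeNum (si : String) : String := String.ofList (removeNumGo si.toList [])

-- ===== PORT B =====
-- Source B: return si.replace("57", "").replace("7", "")
def removeNum_alt (si : String) : String :=
  PySem.Str.replace (PySem.Str.replace si "57" "") "7" ""

-- ===== PRECONDITION & SPEC =====
def Spec_removeNum (si : String) (out : String) : Prop := out = removeNum_alt si
instance (si : String) (out : String) : Decidable (Spec_removeNum si out) := by unfold Spec_removeNum; infer_instance

-- ===== CLAIM (what is proved, stated in full; the proofs are below) =====
def Claim_equal_removeNum : Prop := ∀ (si : String), Dom_removeNum si → Spec_removeNum si (removeNum si)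

-- ===== LEMMAS AND PROOFS =====

-- A's per-position result: drop every '7' and every '5' immediately followed by '7'.
def removeNumG : List Char → List Char
  | [] => []
  | [c] => if c = '7' then [] else [c]
  | c :: d :: t =>
    if c = '7' then removeNumG (d :: t)
    else if c = '5' ∧ d = '7' then removeNumG t
    else c :: removeNumG (d :: t)

-- Deleting every (non-overlapping, hence every) occurrence of "57", scanning left to right.
def drop57 : List Char → List Char
  | [] => []
  | [c] => [c]
  | c :: d :: t => if c = '5' ∧ d = '7' then drop57 t else c :: drop57 (d :: t)

lemma removeNumGo_eq (s : List Char) (ans : List Char) :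
    removeNumGo s ans = ans ++ removeNumG s := by
  match s with
  | [] => rw [removeNumGo]; simp [removeNumG]
  | c :: rest =>
    rw [removeNumGo.eq_def]
    by_cases hdig : PySem.Chars.isdigit c
    · by_cases h7 : c = '7'
      · subst h7
        rcases rest with _ | ⟨d, rest2⟩
        · simp [removeNumGo, removeNumG, hdig]
        · simp [removeNumG, hdig, removeNumGo_eq (d :: rest2) ans]
      · by_cases h5 : c = '5'
        · subst h5
          rcases rest with _ | ⟨d, rest2⟩
          · simp [removeNumGo, removeNumG, h7, hdig]
          · by_cases hd : d = '7'
            · subst hd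
              simp [removeNumG, hdig, h7, removeNumGo_eq rest2 ans]
            · simp [removeNumG, hdig, h7, hd, removeNumGo_eq (d :: rest2) (ans ++ ['5'])]
        · rcases rest with _ | ⟨d, rest2⟩
          · simp [removeNumG, hdig, h7, removeNumGo_eq [] (ans ++ [c])]
          · simp [removeNumG, hdig, h7, h5, removeNumGo_eq (d :: rest2) (ans ++ [c])]
    · have h7 : c ≠ '7' := by rintro rfl; simp [PySem.Chars.isdigit] at hdig
      have h5 : c ≠ '5' := by rintro rfl; simp [PySem.Chars.isdigit] at hdig
      rcases rest with _ | ⟨d, rest2⟩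
      · simp [removeNumG, hdig, h7, removeNumGo_eq [] (ans ++ [c])]
      · have hns : ¬(c = '5' ∧ d = '7') := fun h => h5 h.1
        simp [removeNumG, hdig, h7, hns, removeNumGo_eq (d :: rest2) (ans ++ [c])]
termination_by s.length
decreasing_by all_goals simp only [List.length_cons]; omega

-- replace.go with pattern "57" and empty replacement computes drop57 (fuel ≥ length).
lemma go57_spec (fuel : Nat) (l acc : List Char) (h : l.length ≤ fuel) :
    PySem.Chars.replace.go ['5','7'] [] fuel l acc = acc.reverse ++ drop57 l := by
  induction fuel generalizing l acc with
  | zero =>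
    have hl : l = [] := List.eq_nil_of_length_eq_zero (by omega)
    subst hl
    rw [PySem.Chars.replace.go]
    simp [drop57]
  | succ fuel ih =>
    rcases l with _ | ⟨c, t⟩
    · rw [PySem.Chars.replace.go]
      · simp [drop57]
      · simp
    · rw [PySem.Chars.replace.go]
      rcases t with _ | ⟨d, t2⟩
      · have hp : List.isPrefixOf ['5','7'] [c] = false := by
          cases hc : (('5':Char) == c) <;> simp [List.isPrefixOf, hc]
        rw [hp]
        simp only [Bool.false_eq_true, if_false]
        rw [ih [] (c :: acc) (by simp)]
        simp [drop57]
      · by_cases h57 : c = '5' ∧ d = '7'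
        · obtain ⟨rfl, rfl⟩ := h57
          have hp : List.isPrefixOf ['5','7'] ('5' :: '7' :: t2) = true := by
            simp [List.isPrefixOf]
          rw [hp]
          simp only [if_true, List.reverse_nil, List.nil_append]
          rw [show List.drop (List.length ['5','7']) ('5' :: '7' :: t2) = t2 from rfl]
          rw [ih t2 acc (by simp at h ⊢; omega)]
          simp [drop57]
        · have hp : List.isPrefixOf ['5','7'] (c :: d :: t2) = false := by
            by_cases hc : c = '5'
            · subst hc
              by_cases hd : d = '7'
              · exact absurd ⟨rfl, hd⟩ h57
              · have : (('7':Char) == d) = false := by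
                  cases h' : (('7':Char) == d)
                  · rfl
                  · exact absurd (eq_of_beq h').symm hd
                simp [List.isPrefixOf, this]
            · have : (('5':Char) == c) = false := by
                cases h' : (('5':Char) == c)
                · rfl
                · exact absurd (eq_of_beq h').symm hc
              simp [List.isPrefixOf, this]
          rw [hp]
          simp only [Bool.false_eq_true, if_false]
          rw [ih (d :: t2) (c :: acc) (by simp at h ⊢; omega)]
          rw [drop57]
          simp [h57]

-- replace.go with pattern "7" and empty replacement filters out '7' (fuel ≥ length).
lemma go7_spec (fuel : Nat) (l acc : List Char) (h : l.length ≤ fuel) :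
    PySem.Chars.replace.go ['7'] [] fuel l acc =
      acc.reverse ++ l.filter (fun c => !(c == '7')) := by
  induction fuel generalizing l acc with
  | zero =>
    have hl : l = [] := List.eq_nil_of_length_eq_zero (by omega)
    subst hl
    rw [PySem.Chars.replace.go]
    simp
  | succ fuel ih =>
    rcases l with _ | ⟨c, t⟩
    · rw [PySem.Chars.replace.go]
      · simp
      · simp
    · rw [PySem.Chars.replace.go]
      by_cases h7 : c = '7'
      · subst h7
        have hp : List.isPrefixOf ['7'] ('7' :: t) = true := by simp [List.isPrefixOf]
        rw [hp]
        simp only [if_true, List.reverse_nil, List.nil_append]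
        rw [show List.drop (List.length ['7']) ('7' :: t) = t from rfl]
        rw [ih t acc (by simp at h ⊢; omega)]
        simp
      · have hp : List.isPrefixOf ['7'] (c :: t) = false := by
          have : (('7':Char) == c) = false := by
            cases h' : (('7':Char) == c)
            · rfl
            · exact absurd (eq_of_beq h').symm h7
          simp [List.isPrefixOf, this]
        rw [hp]
        simp only [Bool.false_eq_true, if_false]
        rw [ih t (c :: acc) (by simp at h ⊢; omega)]
        simp [h7]

lemma replace57_eq (l : List Char) :
    PySem.Chars.replace l ['5','7'] [] = drop57 l := by
  rw [PySem.Chars.replace]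
  simp only [List.isEmpty_cons, Bool.false_eq_true, if_false]
  exact (go57_spec l.length l [] le_rfl).trans (by simp)

lemma replace7_eq (l : List Char) :
    PySem.Chars.replace l ['7'] [] = l.filter (fun c => !(c == '7')) := by
  rw [PySem.Chars.replace]
  simp only [List.isEmpty_cons, Bool.false_eq_true, if_false]
  exact (go7_spec l.length l [] le_rfl).trans (by simp)

-- Core fact: filtering the '7's out of drop57 gives A's result.
lemma filter_drop57 (l : List Char) :
    (drop57 l).filter (fun c => !(c == '7')) = removeNumG l := by
  induction l using drop57.induct with
  | case1 => simp [drop57, removeNumG]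
  | case2 c =>
    by_cases h7 : c = '7' <;> simp [drop57, removeNumG, h7]
  | case3 c d t h57 ih =>
    obtain ⟨rfl, rfl⟩ := h57
    rw [drop57, removeNumG]
    simp [ih]
  | case4 c d t h57 ih =>
    by_cases h7 : c = '7'
    · subst h7
      rw [drop57, removeNumG]
      simp [ih]
    · rw [drop57, removeNumG]
      simp [h57, h7, ih]

-- ===== VERDICT (by name: the statement is the Claim_ definition above) =====
theorem removeNum_spec : Claim_equal_removeNum := by
  intro si _
  unfold Spec_removeNum removeNum removeNum_alt
  rw [removeNumGo_eq]
  show String.ofList _ =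
    String.ofList (PySem.Chars.replace (PySem.Str.replace si "57" "").toList "7".toList "".toList)
  rw [PySem.Str.toList_replace]
  show _ = String.ofList (PySem.Chars.replace
    (PySem.Chars.replace si.toList ['5','7'] []) ['7'] [])
  rw [replace57_eq, replace7_eq, filter_drop57]
  simp
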